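-- pv_equiv track=rewrite | github.com/AndreBisker/Projeto-2-Design-de-Software | funcoes.py | calcula_pontos_full_house
-- ===== SOURCE A (Python) =====
-- def calcula_pontos_full_house(r):
--     um=r.count(1)
--     dois=r.count(2)
--     tres=r.count(3)
--     quatro=r.count(4)
--     cinco=r.count(5)
--     seis=r.count(6)
--     soma=0
--     l=[um,dois,tres,quatro,cinco,seis]
--     if 2 in l:
--         if 3 in l:
--             for i in range(len(r)):
--                 soma+=r[i]
--             return soma
--     return 0
-- ===== SOURCE B (Python) =====
-- def calcula_pontos_full_house(r):
--     # sort the in-range faces so equal values are contiguous, then scan run lengths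
--     faces = sorted(x for x in r if 1 <= x <= 6)
--     has2 = False
--     has3 = False
--     run = 0
--     prev = None
--     for x in faces:
--         if x == prev:
--             run += 1
--         else:
--             if run == 2:
--                 has2 = True
--             if run == 3:
--                 has3 = True
--             prev = x
--             run = 1
--     if run == 2:
--         has2 = True
--     if run == 3:
--         has3 = True
--     if has2 and has3:
--         return sum(r)
--     return 0
-- ===== Notes on version B (the rewrite author's own statement) =====
-- stated objective: alternative
-- what changed: B sorts the in-range faces and detects the pair and triple by a run-length scan over the sorted list, instead of A's six per-face .count scans and index-based summing loop.
import Mathlib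
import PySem

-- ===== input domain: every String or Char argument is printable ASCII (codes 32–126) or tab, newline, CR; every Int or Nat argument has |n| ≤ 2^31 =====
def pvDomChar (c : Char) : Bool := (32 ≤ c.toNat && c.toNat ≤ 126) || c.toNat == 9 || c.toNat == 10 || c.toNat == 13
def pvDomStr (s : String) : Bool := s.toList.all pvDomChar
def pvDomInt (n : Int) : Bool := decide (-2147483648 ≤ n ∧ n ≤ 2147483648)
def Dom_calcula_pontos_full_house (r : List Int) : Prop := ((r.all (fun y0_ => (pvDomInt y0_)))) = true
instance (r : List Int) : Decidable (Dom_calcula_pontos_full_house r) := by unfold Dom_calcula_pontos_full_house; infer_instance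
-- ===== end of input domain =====

-- B sorts the in-range faces and finds the pair/triple by a run-length scan over the sorted list (objective: alternative).


-- ===== PORT A =====
-- literal port of A: six .count scans, then an index loop summing r
def calcula_pontos_full_house (r : List Int) : Int :=
  let um := PySem.List.count r 1
  let dois := PySem.List.count r 2
  let tres := PySem.List.count r 3
  let quatro := PySem.List.count r 4
  let cinco := PySem.List.count r 5
  let seis := PySem.List.count r 6
  let l : List Int := [um, dois, tres, quatro, cinco, seis]
  if 2 ∈ l then
    if 3 ∈ l then
      (PySem.List.pyRange 0 (r.length : Int) 1).foldl
        (fun soma i => soma + PySem.List.pyGetD r i 0) 0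
    else 0
  else 0

-- ===== PORT B =====
-- B's loop body: state (prev, run, has2, has3), exactly the for-loop of Source B
def fhStep (st : Option Int × Int × Bool × Bool) (x : Int) : Option Int × Int × Bool × Bool :=
  match st with
  | (prev, run, h2, h3) =>
    if some x = prev then (prev, run + 1, h2, h3)
    else (some x, 1, h2 || (run == 2), h3 || (run == 3))

-- port of B: sort the in-range faces, run-length scan, final flush, then sum(r)
def calcula_pontos_full_house_alt (r : List Int) : Int :=
  let faces := PySem.List.sorted (r.filter (fun x => decide (1 ≤ x ∧ x ≤ 6))) (fun x => x) false
  let st := faces.foldl fhStep (none, 0, false, false)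
  let has2 := st.2.2.1 || (st.2.1 == 2)
  let has3 := st.2.2.2 || (st.2.1 == 3)
  if has2 && has3 then r.foldl (fun a x => a + x) 0 else 0

-- ===== PRECONDITION & SPEC =====
def Spec_calcula_pontos_full_house (r : List Int) (out : Int) : Prop := out = calcula_pontos_full_house_alt r
instance (r : List Int) (out : Int) : Decidable (Spec_calcula_pontos_full_house r out) := by unfold Spec_calcula_pontos_full_house; infer_instance

-- ===== CLAIM (what is proved, stated in full; the proofs are below) =====
def Claim_equal_calcula_pontos_full_house : Prop := ∀ (r : List Int), Dom_calcula_pontos_full_house r → Spec_calcula_pontos_full_house r (calcula_pontos_full_house r)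

-- ===== LEMMAS AND PROOFS =====

lemma fh_scan_spec (l : List Int) (p k : Int) (h2 h3 : Bool)
    (hs : l.Pairwise (· ≤ ·)) (hp : ∀ x ∈ l, p ≤ x) :
    (((l.foldl fhStep (some p, k, h2, h3)).2.2.1 || ((l.foldl fhStep (some p, k, h2, h3)).2.1 == 2)) = true
       ↔ (h2 = true ∨ k + (l.count p : Int) = 2 ∨ ∃ v ∈ l, v ≠ p ∧ ((l.count v : Int) = 2)))
  ∧ (((l.foldl fhStep (some p, k, h2, h3)).2.2.2 || ((l.foldl fhStep (some p, k, h2, h3)).2.1 == 3)) = true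
       ↔ (h3 = true ∨ k + (l.count p : Int) = 3 ∨ ∃ v ∈ l, v ≠ p ∧ ((l.count v : Int) = 3))) := by
  induction l generalizing p k h2 h3 with
  | nil =>
    simp [Bool.or_eq_true, beq_iff_eq]
  | cons x xs ih =>
    rw [List.pairwise_cons] at hs
    by_cases hxp : x = p
    · subst hxp
      have hstep : fhStep (some x, k, h2, h3) x = (some x, k + 1, h2, h3) := by
        simp [fhStep]
      rw [List.foldl_cons, hstep]
      have := ih x (k+1) h2 h3 hs.2 hs.1
      constructor
      · rw [this.1]
        constructor
        · rintro (h | h | ⟨v, hv, hvp, hc⟩)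
          · exact Or.inl h
          · refine Or.inr (Or.inl ?_); rw [List.count_cons_self]; push_cast; omega
          · refine Or.inr (Or.inr ⟨v, List.mem_cons_of_mem _ hv, hvp, ?_⟩)
            simpa [List.count_cons, Ne.symm hvp] using hc
        · rintro (h | h | ⟨v, hv, hvp, hc⟩)
          · exact Or.inl h
          · refine Or.inr (Or.inl ?_); rw [List.count_cons_self] at h; push_cast at h ⊢; omega
          · rcases List.mem_cons.mp hv with rfl | hv'
            · exact absurd rfl hvp
            · refine Or.inr (Or.inr ⟨v, hv', hvp, ?_⟩)
              simpa [List.count_cons, Ne.symm hvp] using hc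
      · rw [this.2]
        constructor
        · rintro (h | h | ⟨v, hv, hvp, hc⟩)
          · exact Or.inl h
          · refine Or.inr (Or.inl ?_); rw [List.count_cons_self]; push_cast; omega
          · refine Or.inr (Or.inr ⟨v, List.mem_cons_of_mem _ hv, hvp, ?_⟩)
            simpa [List.count_cons, Ne.symm hvp] using hc
        · rintro (h | h | ⟨v, hv, hvp, hc⟩)
          · exact Or.inl h
          · refine Or.inr (Or.inl ?_); rw [List.count_cons_self] at h; push_cast at h ⊢; omega
          · rcases List.mem_cons.mp hv with rfl | hv'
            · exact absurd rfl hvp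
            · refine Or.inr (Or.inr ⟨v, hv', hvp, ?_⟩)
              simpa [List.count_cons, Ne.symm hvp] using hc
    · have hpx : p < x := by have := hp x (List.mem_cons_self ..); omega
      have hxle : ∀ y ∈ xs, x ≤ y := hs.1
      have hpnot : p ∉ x :: xs := by
        intro hmem
        rcases List.mem_cons.mp hmem with rfl | h
        · exact hxp rfl
        · exact absurd (hxle p h) (not_le.mpr hpx)
      have hcount0 : (x :: xs).count p = 0 := List.count_eq_zero.mpr hpnot
      have hstep : fhStep (some p, k, h2, h3) x
          = (some x, 1, h2 || (k == 2), h3 || (k == 3)) := by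
        simp [fhStep, hxp]
      rw [List.foldl_cons, hstep]
      have := ih x 1 (h2 || (k == 2)) (h3 || (k == 3)) hs.2 hxle
      have hbij : ∀ (c : Int), ((1 + (xs.count x : Int) = c ∨ ∃ v ∈ xs, v ≠ x ∧ ((xs.count v : Int) = c))
          ↔ (∃ v ∈ x :: xs, v ≠ p ∧ (((x :: xs).count v : Int) = c))) := by
        intro c
        constructor
        · rintro (h | ⟨v, hv, hvx, hc⟩)
          · refine ⟨x, List.mem_cons_self .., hxp, ?_⟩
            rw [List.count_cons_self]; push_cast; omega
          · have hvp : v ≠ p := by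
              intro h; subst h; exact hpnot (List.mem_cons_of_mem _ hv)
            refine ⟨v, List.mem_cons_of_mem _ hv, hvp, ?_⟩
            simpa [List.count_cons, Ne.symm hvx] using hc
        · rintro ⟨v, hv, hvp, hc⟩
          rcases List.mem_cons.mp hv with rfl | hv'
          · left; rw [List.count_cons_self] at hc; push_cast at hc ⊢; omega
          · by_cases hvx : v = x
            · subst hvx; left; rw [List.count_cons_self] at hc; push_cast at hc ⊢; omega
            · right; refine ⟨v, hv', hvx, ?_⟩
              simpa [List.count_cons, Ne.symm hvx] using hc
      constructor
      · rw [this.1, hcount0]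
        rw [← hbij 2]
        simp only [Bool.or_eq_true, beq_iff_eq]
        push_cast
        constructor
        · rintro ((h | h) | h | h) <;> [exact Or.inl h; (right; left; omega); (right; right; left; omega); (right; right; right; exact h)]
        · rintro (h | h | h | h) <;> [exact Or.inl (Or.inl h); (left; right; omega); (right; left; omega); (right; right; exact h)]
      · rw [this.2, hcount0]
        rw [← hbij 3]
        simp only [Bool.or_eq_true, beq_iff_eq]
        push_cast
        constructor
        · rintro ((h | h) | h | h) <;> [exact Or.inl h; (right; left; omega); (right; right; left; omega); (right; right; right; exact h)]
        · rintro (h | h | h | h) <;> [exact Or.inl (Or.inl h); (left; right; omega); (right; left; omega); (right; right; exact h)]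

lemma fh_flags_iff (l : List Int) (hs : l.Pairwise (· ≤ ·)) :
    (((l.foldl fhStep (none, 0, false, false)).2.2.1 || ((l.foldl fhStep (none, 0, false, false)).2.1 == 2)) = true
       ↔ ∃ v ∈ l, (l.count v : Int) = 2)
  ∧ (((l.foldl fhStep (none, 0, false, false)).2.2.2 || ((l.foldl fhStep (none, 0, false, false)).2.1 == 3)) = true
       ↔ ∃ v ∈ l, (l.count v : Int) = 3) := by
  cases l with
  | nil => simp
  | cons x xs =>
    rw [List.pairwise_cons] at hs
    have hstep : fhStep (none, 0, false, false) x = (some x, 1, false, false) := by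
      simp [fhStep]
    rw [List.foldl_cons, hstep]
    have main := fh_scan_spec xs x 1 false false hs.2 hs.1
    have hbij : ∀ (c : Int), ((1 + (xs.count x : Int) = c ∨ ∃ v ∈ xs, v ≠ x ∧ ((xs.count v : Int) = c))
        ↔ (∃ v ∈ x :: xs, (((x :: xs).count v : Int) = c))) := by
      intro c
      constructor
      · rintro (h | ⟨v, hv, hvx, hc⟩)
        · refine ⟨x, List.mem_cons_self .., ?_⟩
          rw [List.count_cons_self]; push_cast; omega
        · refine ⟨v, List.mem_cons_of_mem _ hv, ?_⟩
          simpa [List.count_cons, Ne.symm hvx] using hc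
      · rintro ⟨v, hv, hc⟩
        by_cases hvx : v = x
        · subst hvx; left; rw [List.count_cons_self] at hc; push_cast at hc ⊢; omega
        · rcases List.mem_cons.mp hv with rfl | hv'
          · exact absurd rfl hvx
          · right; refine ⟨v, hv', hvx, ?_⟩
            simpa [List.count_cons, Ne.symm hvx] using hc
    constructor
    · rw [main.1, ← hbij 2]; simp
    · rw [main.2, ← hbij 3]; simp

def fhFaces (r : List Int) : List Int :=
  PySem.List.sorted (r.filter (fun x => decide (1 ≤ x ∧ x ≤ 6))) (fun x => x) false


lemma fhFaces_pairwise (r : List Int) : (fhFaces r).Pairwise (· ≤ ·) := by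
  unfold fhFaces
  exact PySem.List.sorted_pairwise _ (fun x => x)

lemma fhFaces_count (r : List Int) (v : Int) (h1 : 1 ≤ v) (h6 : v ≤ 6) :
    (fhFaces r).count v = r.count v := by
  unfold fhFaces
  rw [(PySem.List.sorted_perm ..).count_eq]
  rw [List.count_filter]
  simp [h1, h6]

lemma fhFaces_mem_bounds (r : List Int) (v : Int) (hv : v ∈ fhFaces r) : 1 ≤ v ∧ v ≤ 6 := by
  unfold fhFaces at hv
  rw [PySem.List.mem_sorted] at hv
  have := List.mem_filter.mp hv
  simpa using this.2

lemma fh_bridge (r : List Int) (c : Int) (hc : 0 < c) :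
    (∃ v ∈ fhFaces r, ((fhFaces r).count v : Int) = c)
    ↔ ((r.count 1 : Int) = c ∨ (r.count 2 : Int) = c ∨ (r.count 3 : Int) = c
       ∨ (r.count 4 : Int) = c ∨ (r.count 5 : Int) = c ∨ (r.count 6 : Int) = c) := by
  constructor
  · rintro ⟨v, hv, hcnt⟩
    obtain ⟨h1, h6⟩ := fhFaces_mem_bounds r v hv
    rw [fhFaces_count r v h1 h6] at hcnt
    have : v = 1 ∨ v = 2 ∨ v = 3 ∨ v = 4 ∨ v = 5 ∨ v = 6 := by omega
    rcases this with rfl|rfl|rfl|rfl|rfl|rfl <;> tauto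
  · intro h
    have build : ∀ f : Int, 1 ≤ f → f ≤ 6 → (r.count f : Int) = c →
        ∃ v ∈ fhFaces r, ((fhFaces r).count v : Int) = c := by
      intro f hf1 hf6 hcf
      have hcc : (fhFaces r).count f = r.count f := fhFaces_count r f hf1 hf6
      refine ⟨f, ?_, by rw [hcc]; exact hcf⟩
      have : 0 < (fhFaces r).count f := by rw [hcc]; omega
      exact List.count_pos_iff.mp this
    rcases h with h|h|h|h|h|h
    exacts [build 1 (by norm_num) (by norm_num) h, build 2 (by norm_num) (by norm_num) h,
      build 3 (by norm_num) (by norm_num) h, build 4 (by norm_num) (by norm_num) h,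
      build 5 (by norm_num) (by norm_num) h, build 6 (by norm_num) (by norm_num) h]


-- ===== VERDICT (by name: the statement is the Claim_ definition above) =====

theorem calcula_pontos_full_house_spec : Claim_equal_calcula_pontos_full_house := by
  intro r _
  unfold Spec_calcula_pontos_full_house calcula_pontos_full_house calcula_pontos_full_house_alt
  have hflags := fh_flags_iff (fhFaces r) (fhFaces_pairwise r)
  have h2 := (hflags.1).trans (fh_bridge r 2 (by norm_num))
  have h3 := (hflags.2).trans (fh_bridge r 3 (by norm_num))
  have hsum := PySem.List.foldl_pyRange_zero_pyGetD' r 0 (fun a x => a + x) 0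
  rw [show PySem.List.sorted (r.filter (fun x => decide (1 ≤ x ∧ x ≤ 6))) (fun x => x) false
      = fhFaces r from rfl]
  simp only [PySem.List.count_eq, List.mem_cons, List.not_mem_nil, or_false,
    Bool.and_eq_true, h2, h3, hsum]
  have e2 : ((2:Int) = (r.count 1 : Int) ∨ (2:Int) = (r.count 2 : Int) ∨ (2:Int) = (r.count 3 : Int)
      ∨ (2:Int) = (r.count 4 : Int) ∨ (2:Int) = (r.count 5 : Int) ∨ (2:Int) = (r.count 6 : Int))
      ↔ ((r.count 1 : Int) = 2 ∨ (r.count 2 : Int) = 2 ∨ (r.count 3 : Int) = 2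
         ∨ (r.count 4 : Int) = 2 ∨ (r.count 5 : Int) = 2 ∨ (r.count 6 : Int) = 2) := by omega
  have e3 : ((3:Int) = (r.count 1 : Int) ∨ (3:Int) = (r.count 2 : Int) ∨ (3:Int) = (r.count 3 : Int)
      ∨ (3:Int) = (r.count 4 : Int) ∨ (3:Int) = (r.count 5 : Int) ∨ (3:Int) = (r.count 6 : Int))
      ↔ ((r.count 1 : Int) = 3 ∨ (r.count 2 : Int) = 3 ∨ (r.count 3 : Int) = 3
         ∨ (r.count 4 : Int) = 3 ∨ (r.count 5 : Int) = 3 ∨ (r.count 6 : Int) = 3) := by omega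
  simp only [e2, e3]
  by_cases hP2 : ((r.count 1 : Int) = 2 ∨ (r.count 2 : Int) = 2 ∨ (r.count 3 : Int) = 2
      ∨ (r.count 4 : Int) = 2 ∨ (r.count 5 : Int) = 2 ∨ (r.count 6 : Int) = 2) <;>
  by_cases hP3 : ((r.count 1 : Int) = 3 ∨ (r.count 2 : Int) = 3 ∨ (r.count 3 : Int) = 3
      ∨ (r.count 4 : Int) = 3 ∨ (r.count 5 : Int) = 3 ∨ (r.count 6 : Int) = 3) <;>
  simp [hP2, hP3]
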